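-- pv_equiv track=rewrite | github.com/WillyWill143/CS50-Python | week2/plates2.py | last
-- ===== SOURCE A (Python) =====
-- def last(s):
--     isAlp = False
--     isNum = False
--     for w in s:
--         if not w.isalpha():
--             isNum = True
--         else:
--             if isNum:
--                 return True
--     return False
-- ===== SOURCE B (Python) =====
-- def last(s):
--     # A letter follows a non-letter iff the total letter count exceeds
--     # the length of the leading run of letters.
--     total = sum(map(str.isalpha, s))
--     leading = 0
--     for c in s:
--         if not c.isalpha():
--             break
--         leading += 1
--     return total > leading
-- ===== Notes on version B (the rewrite author's own statement) =====
-- stated objective: alternative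
-- what changed: Replaced the flag-carrying early-return scan by an arithmetic comparison: count all letters and the length of the leading letter run, and return total > leading (a letter after a non-letter exists iff some letter lies outside the leading run).
import Mathlib
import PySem

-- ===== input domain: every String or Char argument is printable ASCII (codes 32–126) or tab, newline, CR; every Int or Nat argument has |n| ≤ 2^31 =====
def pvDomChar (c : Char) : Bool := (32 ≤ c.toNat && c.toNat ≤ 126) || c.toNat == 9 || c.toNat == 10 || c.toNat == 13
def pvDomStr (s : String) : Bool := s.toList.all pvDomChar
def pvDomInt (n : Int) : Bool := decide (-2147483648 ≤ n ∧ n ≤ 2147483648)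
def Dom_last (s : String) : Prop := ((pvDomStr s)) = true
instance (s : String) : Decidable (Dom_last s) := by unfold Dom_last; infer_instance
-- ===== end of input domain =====

-- B replaces A's flag-carrying early-return scan by an arithmetic comparison of two counts
-- (all letters vs the leading letter run): alternative algorithm, same cost.

-- ===== PORT A =====
-- A's loop: isNum flag carried along, early `return True` becomes returning true
def lastLoop : List Char → Bool → Bool
  | [], _ => false
  | w :: rest, isNum =>
    if !PySem.Chars.isalpha w then lastLoop rest true
    else if isNum then true
    else lastLoop rest isNum

def last (s : String) : Bool := lastLoop s.toList false

-- ===== PORT B =====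
-- `leading` loop of Source B: count letters until the first non-letter (break)
def leadLetters : List Char → Nat
  | [] => 0
  | c :: rest => if !PySem.Chars.isalpha c then 0 else leadLetters rest + 1

def last_alt (s : String) : Bool :=
  let total := s.toList.countP (fun c => PySem.Chars.isalpha c)  -- sum(map(str.isalpha, s))
  decide (total > leadLetters s.toList)

-- ===== PRECONDITION & SPEC =====
def Spec_last (s : String) (out : Bool) : Prop := out = last_alt s
instance (s : String) (out : Bool) : Decidable (Spec_last s out) := by unfold Spec_last; infer_instance

-- ===== CLAIM (what is proved, stated in full; the proofs are below) =====
def Claim_equal_last : Prop := ∀ (s : String), Dom_last s → Spec_last s (last s)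

-- ===== LEMMAS AND PROOFS =====
theorem lastLoop_eq (l : List Char) (b : Bool) :
    lastLoop l b = if b then l.any PySem.Chars.isalpha
                   else (l.dropWhile PySem.Chars.isalpha).any PySem.Chars.isalpha := by
  induction l generalizing b with
  | nil => simp [lastLoop]
  | cons w rest ih =>
    simp only [lastLoop, List.dropWhile_cons, List.any_cons]
    cases hw : PySem.Chars.isalpha w <;> cases b <;> simp [ih, hw]

theorem leadLetters_eq (l : List Char) :
    leadLetters l = (l.takeWhile PySem.Chars.isalpha).length := by
  induction l with
  | nil => simp [leadLetters]
  | cons c rest ih =>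
    simp only [leadLetters, List.takeWhile_cons]
    cases hc : PySem.Chars.isalpha c <;> simp [ih]

theorem dropWhile_any_eq_count (l : List Char) (p : Char → Bool) :
    (l.dropWhile p).any p
      = decide ((l.takeWhile p).length < l.countP p) := by
  have hsplit : l.countP p
      = (l.takeWhile p).countP p + (l.dropWhile p).countP p := by
    conv_lhs => rw [← List.takeWhile_append_dropWhile (p := p) (l := l)]
    exact List.countP_append ..
  have htake : (l.takeWhile p).countP p = (l.takeWhile p).length :=
    List.countP_eq_length.mpr (fun a ha => List.mem_takeWhile_imp ha)
  cases hany : (l.dropWhile p).any p with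
  | false =>
    have h0 : (l.dropWhile p).countP p = 0 := by
      rw [List.countP_eq_zero]
      intro a ha
      intro hpa
      exact (by simpa [hany] using (List.any_eq_true.mpr ⟨a, ha, hpa⟩) : False)
    simp [hsplit, htake, h0]
  | true =>
    obtain ⟨a, ha, hpa⟩ := List.any_eq_true.mp hany
    have hpos : 0 < (l.dropWhile p).countP p :=
      List.countP_pos_iff.mpr ⟨a, ha, hpa⟩
    have : (l.takeWhile p).length < l.countP p := by omega
    simp [this]

-- ===== VERDICT (by name: the statement is the Claim_ definition above) =====
theorem last_spec : Claim_equal_last := by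
  intro s _
  unfold Spec_last last last_alt
  rw [lastLoop_eq, leadLetters_eq, dropWhile_any_eq_count]
  simp
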